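-- pv_equiv track=rewrite | github.com/Foofdof/Numerical-Methods | Minimization problems/functions.py | schwefel_second
-- ===== SOURCE A (Python) =====
-- def schwefel_second(x_vector):
--     """x_d -- vector of cords xi in d-dimension space"""
--     result = 0
--     for i in range(len(x_vector)):
--         temp_res = 0
--         for j in range(i):
--             temp_res += x_vector[j]
--         result += temp_res ** 2
--
--     return result
-- ===== SOURCE B (Python) =====
-- def schwefel_second(x_vector):
--     """x_d -- vector of cords xi in d-dimension space"""
--     total = 0
--     prefix = 0
--     for x in x_vector:
--         total += prefix * prefix
--         prefix += x
--     return total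
-- ===== Notes on version B (the rewrite author's own statement) =====
-- stated objective: faster
-- what changed: replaced the quadratic recomputation of each prefix sum by a single pass that maintains a running prefix sum and accumulates its square
import Mathlib
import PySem

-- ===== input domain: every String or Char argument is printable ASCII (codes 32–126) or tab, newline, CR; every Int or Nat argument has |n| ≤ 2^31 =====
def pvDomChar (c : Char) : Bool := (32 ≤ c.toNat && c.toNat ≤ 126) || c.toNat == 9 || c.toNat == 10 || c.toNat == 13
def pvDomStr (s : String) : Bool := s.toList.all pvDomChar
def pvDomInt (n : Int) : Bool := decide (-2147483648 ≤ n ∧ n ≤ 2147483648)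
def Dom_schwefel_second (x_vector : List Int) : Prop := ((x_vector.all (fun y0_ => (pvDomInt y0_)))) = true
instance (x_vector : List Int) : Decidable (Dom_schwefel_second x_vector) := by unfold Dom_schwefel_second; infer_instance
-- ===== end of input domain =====

-- B replaces A's O(n^2) recomputation of every prefix sum by one pass with a running prefix sum (objective: faster).

-- ===== PORT A =====
def schwefel_second (x_vector : List Int) : Int :=
  (PySem.List.pyRange 0 x_vector.length 1).foldl
    (fun result i =>
      result +
        ((PySem.List.pyRange 0 i 1).foldl
          (fun temp_res j => temp_res + PySem.List.pyGetD x_vector j 0) 0) ^ 2)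
    0

-- ===== PORT B =====
def schwefel_second_alt (x_vector : List Int) : Int :=
  (x_vector.foldl (fun (st : Int × Int) x => (st.1 + st.2 * st.2, st.2 + x)) (0, 0)).1

-- ===== PRECONDITION & SPEC =====
def Spec_schwefel_second (x_vector : List Int) (out : Int) : Prop := out = schwefel_second_alt x_vector
instance (x_vector : List Int) (out : Int) : Decidable (Spec_schwefel_second x_vector out) := by unfold Spec_schwefel_second; infer_instance

-- ===== CLAIM (what is proved, stated in full; the proofs are below) =====
def Claim_equal_schwefel_second : Prop := ∀ (x_vector : List Int), Dom_schwefel_second x_vector → Spec_schwefel_second x_vector (schwefel_second x_vector)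

-- ===== LEMMAS AND PROOFS =====

-- B's fold state: second component is the running prefix sum.
theorem alt_fold_snd (xs : List Int) (st : Int × Int) :
    (xs.foldl (fun (st : Int × Int) x => (st.1 + st.2 * st.2, st.2 + x)) st).2 = st.2 + xs.sum := by
  induction xs generalizing st with
  | nil => simp
  | cons x xs ih => simp [List.foldl_cons, ih]; ring

theorem alt_append (xs : List Int) (x : Int) :
    schwefel_second_alt (xs ++ [x]) = schwefel_second_alt xs + xs.sum * xs.sum := by
  simp [schwefel_second_alt, List.foldl_append, alt_fold_snd]

-- A's inner loop over range(i) sums xs's first i elements; unchanged by appending past index i.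
theorem pvInnerCongr (xs : List Int) (x : Int) (i : Int) (_h0 : 0 ≤ i) (h : i ≤ (xs.length : Int)) :
    (PySem.List.pyRange 0 i 1).foldl
      (fun temp_res j => temp_res + PySem.List.pyGetD (xs ++ [x]) j 0) 0
    = (PySem.List.pyRange 0 i 1).foldl
      (fun temp_res j => temp_res + PySem.List.pyGetD xs j 0) 0 := by
  apply PySem.List.foldl_congr_mem
  intro acc j hj
  rw [PySem.List.mem_pyRange_one] at hj
  have hjlt : j.toNat < xs.length := by omega
  rw [PySem.List.pyGetD_eq_getElem (xs ++ [x]) 0 hj.1 (by simp; omega),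
      PySem.List.pyGetD_eq_getElem xs 0 hj.1 (by omega)]
  rw [List.getElem_append_left hjlt]

theorem pvInnerFull (xs : List Int) (x : Int) :
    (PySem.List.pyRange 0 (xs.length : Int) 1).foldl
      (fun temp_res j => temp_res + PySem.List.pyGetD (xs ++ [x]) j 0) 0 = xs.sum := by
  rw [pvInnerCongr xs x _ (by positivity) le_rfl,
      PySem.List.foldl_pyRange_zero_pyGetD' xs 0 (fun a b => a + b) 0]
  simp [List.sum_eq_foldl]

theorem a_append (xs : List Int) (x : Int) :
    schwefel_second (xs ++ [x]) = schwefel_second xs + xs.sum * xs.sum := by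
  unfold schwefel_second
  have hlen : ((xs ++ [x]).length : Int) = (xs.length : Int) + 1 := by simp
  rw [hlen, PySem.List.pyRange_one_succ_right (by positivity), List.foldl_append]
  simp only [List.foldl_cons, List.foldl_nil]
  rw [pvInnerFull]
  have hcongr :
      (PySem.List.pyRange 0 (xs.length : Int) 1).foldl
        (fun result i => result +
          ((PySem.List.pyRange 0 i 1).foldl
            (fun temp_res j => temp_res + PySem.List.pyGetD (xs ++ [x]) j 0) 0) ^ 2) 0
      = (PySem.List.pyRange 0 (xs.length : Int) 1).foldl
        (fun result i => result +
          ((PySem.List.pyRange 0 i 1).foldl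
            (fun temp_res j => temp_res + PySem.List.pyGetD xs j 0) 0) ^ 2) 0 := by
    apply PySem.List.foldl_congr_mem
    intro acc i hi
    rw [PySem.List.mem_pyRange_one] at hi
    rw [pvInnerCongr xs x i hi.1 (le_of_lt hi.2)]
  rw [hcongr]; ring

theorem ports_agree (xs : List Int) : schwefel_second xs = schwefel_second_alt xs := by
  induction xs using List.reverseRecOn with
  | nil => decide
  | append_singleton xs x ih => rw [a_append, alt_append, ih]

-- ===== VERDICT (by name: the statement is the Claim_ definition above) =====
theorem schwefel_second_spec : Claim_equal_schwefel_second := by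
  intro xs _
  unfold Spec_schwefel_second
  exact ports_agree xs
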